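-- pv_equiv track=rewrite | github.com/sjoongh/algorithm-study | python/프로그래머스/이상한 문자.py | solution
-- ===== SOURCE A (Python) =====
-- def solution(s):
--     # 공백을 기준으로 나눔
--     s_split = s.split(' ')
--     # 공백을 기준으로 나눈 각각의 요소 출력
--     for i in range(len(s_split)):
--         # 리스트 형식으로 만듬
--         s_list = list(s_split[i])
--         for j in range(len(s_list)):
--             if j % 2 == 0:
--                 s_list[j] = s_list[j].upper()
--             elif j % 2 == 1:
--                 s_list[j] = s_list[j].lower()
--         s_split[i] = "".join(s_list)
--     # list를 str로
--     answer = " ".join(s_split)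
--     return answer
-- ===== SOURCE B (Python) =====
-- def solution(s):
--     res = []
--     up = True  # next non-space char should be uppercased
--     for c in s:
--         if c == ' ':
--             res.append(c)
--             up = True
--         else:
--             res.append(c.upper() if up else c.lower())
--             up = not up
--     return ''.join(res)
-- ===== Notes on version B (the rewrite author's own statement) =====
-- stated objective: simpler
-- what changed: Replaces A's split-on-space, per-word indexed upper/lower rewrite and space-rejoin by a single character pass that carries an uppercase-next flag reset at every space.
import Mathlib
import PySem

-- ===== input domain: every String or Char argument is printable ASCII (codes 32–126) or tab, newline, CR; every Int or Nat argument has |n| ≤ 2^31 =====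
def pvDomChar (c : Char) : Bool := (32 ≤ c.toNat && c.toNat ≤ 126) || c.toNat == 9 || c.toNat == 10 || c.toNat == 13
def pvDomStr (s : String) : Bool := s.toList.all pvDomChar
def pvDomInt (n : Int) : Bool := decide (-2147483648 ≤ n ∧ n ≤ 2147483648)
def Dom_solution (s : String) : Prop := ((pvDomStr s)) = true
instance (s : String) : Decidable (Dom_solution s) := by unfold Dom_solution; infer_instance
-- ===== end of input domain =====

-- B replaces A's split-on-space / per-word indexed casing / rejoin by a single pass
-- over the characters with a case toggle reset at each space (objective: simpler).

-- ===== PORT A =====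
-- A: split on ' ', upper even-index / lower odd-index chars of each piece, rejoin with ' '.
def solution (s : String) : String :=
  let s_split := PySem.Chars.splitOn s.toList [' ']
  let s_split2 := s_split.map (fun w =>
    (PySem.List.enumerate w 0).map (fun p =>
      if PySem.Int.mod p.1 2 = 0 then PySem.Chars.upperChar p.2
      else if PySem.Int.mod p.1 2 = 1 then PySem.Chars.lowerChar p.2
      else p.2))
  String.mk (PySem.Chars.join [' '] s_split2)

-- ===== PORT B =====
-- B: one pass; state = (output chars so far, whether the next letter is uppercased).
def solution_alt (s : String) : String :=
  String.mk
    (s.toList.foldl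
      (fun (st : List Char × Bool) c =>
        if c = ' ' then (st.1 ++ [c], true)
        else (st.1 ++ [if st.2 then PySem.Chars.upperChar c else PySem.Chars.lowerChar c], !st.2))
      ([], true)).1

-- ===== PRECONDITION & SPEC =====
def Spec_solution (s : String) (out : String) : Prop := out = solution_alt s
instance (s : String) (out : String) : Decidable (Spec_solution s out) := by unfold Spec_solution; infer_instance

-- ===== CLAIM (what is proved, stated in full; the proofs are below) =====
def Claim_equal_solution : Prop := ∀ (s : String), Dom_solution s → Spec_solution s (solution s)

-- ===== LEMMAS AND PROOFS =====

-- reference single-pass transformation with an explicit "uppercase next" flag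
def pvProc : List Char → Bool → List Char
  | [], _ => []
  | c :: t, b =>
    if c = ' ' then ' ' :: pvProc t true
    else (if b then PySem.Chars.upperChar c else PySem.Chars.lowerChar c) :: pvProc t (!b)

-- reference splitter on a single space, carrying the current piece reversed (as splitOn.go does)
def pvSplit : List Char → List Char → List (List Char)
  | cur, [] => [cur.reverse]
  | cur, c :: t => if c = ' ' then cur.reverse :: pvSplit [] t else pvSplit (c :: cur) t

-- A's per-word casing
def pvCase (w : List Char) : List Char :=
  (PySem.List.enumerate w 0).map (fun p =>
    if PySem.Int.mod p.1 2 = 0 then PySem.Chars.upperChar p.2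
    else if PySem.Int.mod p.1 2 = 1 then PySem.Chars.lowerChar p.2
    else p.2)

theorem pvSplit_go (fuel : Nat) : ∀ (l cur : List Char) (acc : List (List Char)),
    l.length ≤ fuel →
    PySem.Chars.splitOn.go [' '] fuel l cur acc = acc.reverse ++ pvSplit cur l := by
  induction fuel with
  | zero =>
    intro l cur acc h
    have : l = [] := List.eq_nil_of_length_eq_zero (Nat.le_zero.mp h)
    subst this
    simp [PySem.Chars.splitOn.go, pvSplit]
  | succ n ih =>
    intro l cur acc h
    cases l with
    | nil => simp [PySem.Chars.splitOn.go, pvSplit]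
    | cons c rest =>
      rw [PySem.Chars.splitOn.go]
      by_cases hc : c = ' '
      · subst hc
        have hpre : [' '].isPrefixOf (' ' :: rest) = true := by simp [List.isPrefixOf]
        rw [if_pos hpre]
        simp only [List.length_cons] at h
        rw [ih _ _ _ (by simpa using Nat.le_of_succ_le_succ h)]
        simp [pvSplit]
      · have hpre : [' '].isPrefixOf (c :: rest) = false := by
          simp [List.isPrefixOf]
          exact fun h => hc h.symm
        rw [hpre]
        simp only [Bool.false_eq_true, if_false]
        simp only [List.length_cons] at h
        rw [ih _ _ _ (Nat.le_of_succ_le_succ h)]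
        simp [pvSplit, hc]

theorem pvSplit_ne_nil : ∀ (cs cur : List Char), pvSplit cur cs ≠ [] := by
  intro cs
  induction cs with
  | nil => intro cur; simp [pvSplit]
  | cons c t ih =>
    intro cur
    by_cases hc : c = ' ' <;> simp [pvSplit, hc, ih]

theorem pvCase_append (w : List Char) (c : Char) :
    pvCase (w ++ [c]) = pvCase w ++
      [if w.length % 2 = 0 then PySem.Chars.upperChar c else PySem.Chars.lowerChar c] := by
  unfold pvCase
  rw [PySem.List.enumerate_append]
  simp only [List.map_append]
  congr 1
  simp only [PySem.List.enumerate_cons, PySem.List.enumerate_nil, List.map]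
  rw [show PySem.Int.mod ((0 : Int) + (w.length : Int)) 2 = ((w.length % 2 : Nat) : Int) from by
    rw [zero_add]; exact_mod_cast PySem.Int.mod_natCast w.length 2]
  by_cases hp : w.length % 2 = 0
  · simp [hp]
  · simp [Nat.mod_two_ne_zero.mp hp]

theorem pvJoin_split (cs : List Char) : ∀ (cur : List Char),
    PySem.Chars.join [' '] ((pvSplit cur cs).map pvCase) =
      pvCase cur.reverse ++ pvProc cs (decide (cur.length % 2 = 0)) := by
  induction cs with
  | nil =>
    intro cur
    simp [pvSplit, pvProc, PySem.Chars.join, List.intercalate]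
  | cons c t ih =>
    intro cur
    by_cases hc : c = ' '
    · subst hc
      have hsp : pvSplit cur (' ' :: t) = cur.reverse :: pvSplit [] t := by simp [pvSplit]
      rw [hsp, List.map_cons]
      obtain ⟨w, rest, hw⟩ : ∃ w rest, pvSplit ([] : List Char) t = w :: rest := by
        cases h : pvSplit ([] : List Char) t with
        | nil => exact absurd h (pvSplit_ne_nil t [])
        | cons w rest => exact ⟨w, rest, rfl⟩
      have hjoin : PySem.Chars.join [' '] (pvCase cur.reverse :: (pvSplit ([] : List Char) t).map pvCase)
          = pvCase cur.reverse ++ [' '] ++ PySem.Chars.join [' '] ((pvSplit ([] : List Char) t).map pvCase) := by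
        rw [hw]; simp [PySem.Chars.join, List.intercalate]
      rw [hjoin, ih []]
      simp [pvProc, pvCase]
    · simp only [pvSplit, if_neg hc]
      rw [ih (c :: cur)]
      simp only [List.reverse_cons, pvCase_append]
      have hb : (decide ((c :: cur).length % 2 = 0)) = !(decide (cur.length % 2 = 0)) := by
        simp only [List.length_cons]
        by_cases hp : cur.length % 2 = 0
        · have : (cur.length + 1) % 2 = 1 := by omega
          simp [hp, this]
        · have h1 : cur.length % 2 = 1 := Nat.mod_two_ne_zero.mp hp
          have : (cur.length + 1) % 2 = 0 := by omega
          simp [h1, this]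
      rw [hb]
      have hproc : pvProc (c :: t) (decide (cur.length % 2 = 0)) =
          (if decide (cur.length % 2 = 0) then PySem.Chars.upperChar c else PySem.Chars.lowerChar c)
            :: pvProc t (!(decide (cur.length % 2 = 0))) := by
        simp [pvProc, hc]
      rw [hproc]
      simp only [List.length_reverse, List.append_assoc, List.singleton_append]
      by_cases hp : cur.length % 2 = 0 <;> simp [hp]

theorem pvFold_proc (cs : List Char) : ∀ (acc : List Char) (b : Bool),
    (cs.foldl
      (fun (st : List Char × Bool) c =>
        if c = ' ' then (st.1 ++ [c], true)
        else (st.1 ++ [if st.2 then PySem.Chars.upperChar c else PySem.Chars.lowerChar c], !st.2))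
      (acc, b)).1 = acc ++ pvProc cs b := by
  induction cs with
  | nil => intro acc b; simp [pvProc]
  | cons c t ih =>
    intro acc b
    by_cases hc : c = ' '
    · subst hc
      simp only [List.foldl_cons, reduceIte]
      rw [ih]
      simp [pvProc]
    · simp only [List.foldl_cons, if_neg hc]
      rw [ih]
      simp [pvProc, hc]

-- ===== VERDICT (by name: the statement is the Claim_ definition above) =====
theorem solution_spec : Claim_equal_solution := by
  intro s _
  unfold Spec_solution solution solution_alt
  have hsplit : PySem.Chars.splitOn s.toList [' '] = pvSplit [] s.toList := by
    unfold PySem.Chars.splitOn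
    rw [pvSplit_go (s.toList.length + 1) s.toList [] [] (Nat.le_succ _)]
    simp
  rw [pvFold_proc s.toList [] true, hsplit]
  show String.mk (PySem.Chars.join [' '] ((pvSplit [] s.toList).map pvCase)) =
    String.mk ([] ++ pvProc s.toList true)
  rw [pvJoin_split s.toList []]
  rfl
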